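-- pv_equiv track=rewrite | github.com/Herwal/Waterman-smith-binf | Smith-Waterman_Local_Alignment.py | get_alignment_statistics
-- ===== SOURCE A (Python) =====
-- def get_alignment_statistics(aligned_sequences: list) -> tuple:
--     """
--     Function to calculate the statistics for an alignment.
--     @param aligned_sequences: a list of the aligned sequences, contains only 1 alignment for each call.
--     @return: The number of matches, mismatches and gaps in the alignment.
--     """
--     matches, mismatches, gaps = 0, 0, 0
--     a1, a2 = aligned_sequences
--
--     for i in range(len(a1)):
--         if a1[i] != "-" and a2[i] != "-":
--             if a1[i] == a2[i]:
--                 matches += 1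
--             else:
--                 mismatches += 1
--         else:
--             gaps += 1
--
--     return matches, mismatches, gaps
-- ===== SOURCE B (Python) =====
-- def get_alignment_statistics(aligned_sequences: list) -> tuple:
--     a1, a2 = aligned_sequences
--     n = len(a1)
--     gaps = sum(1 for i in range(n) if a1[i] == "-" or a2[i] == "-")
--     matches = sum(1 for i in range(n)
--                   if a1[i] != "-" and a2[i] != "-" and a1[i] == a2[i])
--     mismatches = n - gaps - matches
--     return matches, mismatches, gaps
-- ===== Notes on version B (the rewrite author's own statement) =====
-- stated objective: alternative
-- what changed: Replaces the single three-way branching loop by two independent counting passes (gaps, matches) and derives mismatches arithmetically as n - gaps - matches, with no mismatch branch at all.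
import Mathlib
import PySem

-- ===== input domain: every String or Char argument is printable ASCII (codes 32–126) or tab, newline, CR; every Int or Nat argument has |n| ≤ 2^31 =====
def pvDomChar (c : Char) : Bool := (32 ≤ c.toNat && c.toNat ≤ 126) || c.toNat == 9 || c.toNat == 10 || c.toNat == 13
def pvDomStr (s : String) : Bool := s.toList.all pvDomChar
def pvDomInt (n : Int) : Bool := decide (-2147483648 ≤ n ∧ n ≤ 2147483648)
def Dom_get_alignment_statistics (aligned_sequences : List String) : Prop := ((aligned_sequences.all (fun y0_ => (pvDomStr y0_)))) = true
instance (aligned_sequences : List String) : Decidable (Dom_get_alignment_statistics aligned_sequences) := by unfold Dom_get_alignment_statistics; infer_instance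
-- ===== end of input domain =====

-- B computes gaps and matches in two independent counting passes and derives mismatches
-- arithmetically (n - gaps - matched), instead of A's single three-way branching loop.


-- ===== PORT A =====
-- Literal port of A: one loop over range(len(a1)) keeping the triple (matched, mismatches, gaps).
-- Outside Pre_ (unpack/IndexError in Python) the port returns a dummy (0,0,0); nothing is claimed there.
def get_alignment_statistics (aligned_sequences : List String) : Int × Int × Int :=
  match aligned_sequences with
  | [a1, a2] =>
    let l1 := a1.toList
    let l2 := a2.toList
    (PySem.List.pyRange 0 l1.length 1).foldl
      (fun (s : Int × Int × Int) i =>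
        match PySem.List.pyGet? l1 i with
        | some c1 =>
          -- 'a1[i] != "-" and a2[i] != "-"': a2[i] is only evaluated when a1[i] != '-'
          if c1 ≠ '-' then
            match PySem.List.pyGet? l2 i with
            | some c2 =>
              if c2 ≠ '-' then
                if c1 = c2 then (s.1 + 1, s.2.1, s.2.2)
                else (s.1, s.2.1 + 1, s.2.2)
              else (s.1, s.2.1, s.2.2 + 1)
            | none => s
          else (s.1, s.2.1, s.2.2 + 1)
        | none => s)
      (0, 0, 0)
  | _ => (0, 0, 0)

-- ===== PORT B =====
-- Literal port of B: two 0/1-sum passes (gaps, matches) and mismatches = n - gaps - matched.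
def get_alignment_statistics_alt (aligned_sequences : List String) : Int × Int × Int :=
  -- 'a1, a2 = aligned_sequences' rendered with a length guard and positional lookups
  -- (avoids sharing a compiler-generated matcher with port A); dummy (0,0,0) outside Pre_.
  if aligned_sequences.length = 2 then
    let l1 := (aligned_sequences.getD 0 "").toList
    let l2 := (aligned_sequences.getD 1 "").toList
    let n : Int := l1.length
    let gaps : Int := (PySem.List.pyRange 0 l1.length 1).foldl
      (fun acc i =>
        if PySem.List.pyGet? l1 i = some '-' ∨ PySem.List.pyGet? l2 i = some '-'
        then acc + 1 else acc) 0
    let matched : Int := (PySem.List.pyRange 0 l1.length 1).foldl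
      (fun acc i =>
        if PySem.List.pyGet? l1 i ≠ some '-' ∧ PySem.List.pyGet? l2 i ≠ some '-'
           ∧ PySem.List.pyGet? l1 i = PySem.List.pyGet? l2 i
        then acc + 1 else acc) 0
    let mismatches : Int := n - gaps - matched
    (matched, mismatches, gaps)
  else (0, 0, 0)

-- ===== PRECONDITION & SPEC =====
-- Pre_ excludes exactly the inputs where Python A raises: a list whose length is not 2
-- (unpacking ValueError), and pairs where some position of a1 beyond the end of a2 is not '-'
-- (IndexError; when a1[i] == '-' short-circuiting skips a2[i]); B raises there too.
def Pre_get_alignment_statistics (aligned_sequences : List String) : Prop :=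
  aligned_sequences.length = 2 ∧
  (((aligned_sequences.getD 0 "").toList.drop (aligned_sequences.getD 1 "").toList.length).all
     (fun c => c = '-')) = true
instance (aligned_sequences : List String) : Decidable (Pre_get_alignment_statistics aligned_sequences) := by
  unfold Pre_get_alignment_statistics; infer_instance

def pvWitness_get_alignment_statistics : List String := ["AC-GT", "A-CGT"]

def Spec_get_alignment_statistics (aligned_sequences : List String) (out : Int × Int × Int) : Prop := out = get_alignment_statistics_alt aligned_sequences
instance (aligned_sequences : List String) (out : Int × Int × Int) : Decidable (Spec_get_alignment_statistics aligned_sequences out) := by unfold Spec_get_alignment_statistics; infer_instance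

-- ===== CLAIM (what is proved, stated in full; the proofs are below) =====
def Claim_equal_get_alignment_statistics : Prop := ∀ (aligned_sequences : List String), Dom_get_alignment_statistics aligned_sequences → Pre_get_alignment_statistics aligned_sequences → Spec_get_alignment_statistics aligned_sequences (get_alignment_statistics aligned_sequences)

-- ===== LEMMAS AND PROOFS =====

-- Combined loop invariant: on the range 0..n (n within a1; a2 covering every non-'-' position
-- below n), A's fold equals (matches, n - gaps - matches, gaps) where matches/gaps are B's
-- counting folds.
theorem pv_main (l1 l2 : List Char) (n : Nat) (h1 : n ≤ l1.length)
    (h2 : ∀ i : Nat, (hi : i < l1.length) → i < n → l1[i] ≠ '-' → i < l2.length) :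
    (PySem.List.pyRange 0 n 1).foldl
      (fun (s : Int × Int × Int) i =>
        match PySem.List.pyGet? l1 i with
        | some c1 =>
          if c1 ≠ '-' then
            match PySem.List.pyGet? l2 i with
            | some c2 =>
              if c2 ≠ '-' then
                if c1 = c2 then (s.1 + 1, s.2.1, s.2.2)
                else (s.1, s.2.1 + 1, s.2.2)
              else (s.1, s.2.1, s.2.2 + 1)
            | none => s
          else (s.1, s.2.1, s.2.2 + 1)
        | none => s)
      (0, 0, 0)
    =
    ((PySem.List.pyRange 0 n 1).foldl
        (fun (acc : Int) i =>
          if PySem.List.pyGet? l1 i ≠ some '-' ∧ PySem.List.pyGet? l2 i ≠ some '-'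
             ∧ PySem.List.pyGet? l1 i = PySem.List.pyGet? l2 i
          then acc + 1 else acc) 0,
     (n : Int)
       - (PySem.List.pyRange 0 n 1).foldl
           (fun (acc : Int) i =>
             if PySem.List.pyGet? l1 i = some '-' ∨ PySem.List.pyGet? l2 i = some '-'
             then acc + 1 else acc) 0
       - (PySem.List.pyRange 0 n 1).foldl
           (fun (acc : Int) i =>
             if PySem.List.pyGet? l1 i ≠ some '-' ∧ PySem.List.pyGet? l2 i ≠ some '-'
                ∧ PySem.List.pyGet? l1 i = PySem.List.pyGet? l2 i
             then acc + 1 else acc) 0,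
     (PySem.List.pyRange 0 n 1).foldl
       (fun (acc : Int) i =>
         if PySem.List.pyGet? l1 i = some '-' ∨ PySem.List.pyGet? l2 i = some '-'
         then acc + 1 else acc) 0) := by
  induction n with
  | zero => simp
  | succ n ih =>
    have hr : PySem.List.pyRange 0 ((n : Int) + 1) 1
        = PySem.List.pyRange 0 n 1 ++ [(n : Int)] :=
      PySem.List.pyRange_one_succ_right (by exact_mod_cast Nat.zero_le n)
    have hn1 : ((n + 1 : Nat) : Int) = (n : Int) + 1 := by push_cast; ring
    have hnlt : n < l1.length := by omega
    have hg1 : PySem.List.pyGet? l1 (n : Int) = some l1[n] :=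
      PySem.List.pyGet?_ofNat l1 n hnlt
    rw [hn1, hr]
    simp only [List.foldl_append, List.foldl_cons, List.foldl_nil,
      ih (by omega) (fun i hi hin => h2 i hi (by omega)), hg1]
    by_cases hd1 : l1[n] = '-'
    · simp [hd1]
    · have hlt2 : n < l2.length := h2 n hnlt (by omega) hd1
      have hg2 : PySem.List.pyGet? l2 (n : Int) = some l2[n] :=
        PySem.List.pyGet?_ofNat l2 n hlt2
      simp only [hg2]
      by_cases hd2 : l2[n] = '-'
      · simp [hd1, hd2]
      · by_cases he : l1[n] = l2[n]
        · simp [hd2, he]; ring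
        · simp [hd1, hd2, he]; ring

-- ===== VERDICT (by name: the statement is the Claim_ definition above) =====
theorem get_alignment_statistics_spec : Claim_equal_get_alignment_statistics := by
  intro xs _ hpre
  obtain ⟨hlen, hall⟩ := hpre
  match xs with
  | [a1, a2] =>
    simp only [List.getD, List.getElem?_cons_zero, List.getElem?_cons_succ,
      Option.getD_some] at hall
    show get_alignment_statistics [a1, a2] = get_alignment_statistics_alt [a1, a2]
    simp only [get_alignment_statistics, get_alignment_statistics_alt]
    have h2 : ∀ i : Nat, (hi : i < a1.toList.length) → i < a1.toList.length →
        a1.toList[i] ≠ '-' → i < a2.toList.length := by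
      intro i hi _ hne
      by_contra hge
      apply hne
      have hge' : a2.toList.length ≤ i := by omega
      have hmem : a1.toList[i] ∈ a1.toList.drop a2.toList.length := by
        have hq : (a1.toList.drop a2.toList.length)[i - a2.toList.length]?
            = some a1.toList[i] := by
          rw [List.getElem?_drop,
            show a2.toList.length + (i - a2.toList.length) = i by omega]
          exact List.getElem?_eq_getElem hi
        exact List.mem_of_getElem? hq
      have := List.all_eq_true.mp hall _ hmem
      simpa using this
    simpa using pv_main a1.toList a2.toList a1.toList.length (le_refl _) h2
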